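-- pv_equiv track=rewrite | github.com/vijay-varadarajan/Sleep-Inspired-Memory | locomo_preprocessing.py | _build_incorrect_answers
-- ===== SOURCE A (Python) =====
-- from typing import Any, Dict, List, Tuple
--
-- def _safe_text(value: Any) -> str:
--     """Convert value to clean text."""
--     if value is None:
--         return ""
--     if isinstance(value, str):
--         return value.strip()
--     return str(value).strip()
--
-- def _build_incorrect_answers(qa_item: Dict[str, Any], qa_items: List[Dict[str, Any]], idx: int) -> List[str]:
--     """Build negative answers using adversarial answer first, then other answers."""
--     negatives: List[str] = []
--
--     adv = _safe_text(qa_item.get("adversarial_answer"))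
--     if adv:
--         negatives.append(adv)
--
--     for j, other in enumerate(qa_items):
--         if j == idx:
--             continue
--         ans = _safe_text(other.get("answer"))
--         if ans and ans not in negatives:
--             negatives.append(ans)
--         if len(negatives) >= 5:
--             break
--
--     return negatives
-- ===== SOURCE B (Python) =====
-- def _safe_text(value):
--     """Convert value to clean text."""
--     if value is None:
--         return ""
--     if isinstance(value, str):
--         return value.strip()
--     return str(value).strip()
--
--
-- def _build_incorrect_answers(qa_item, qa_items, idx):
--     """Collect all candidates in order, dedup preserving first occurrence, keep 5."""
--     adv = _safe_text(qa_item.get("adversarial_answer"))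
--     candidates = [adv] if adv else []
--     candidates += [
--         ans
--         for j, other in enumerate(qa_items)
--         if j != idx
--         for ans in [_safe_text(other.get("answer"))]
--         if ans
--     ]
--     return list(dict.fromkeys(candidates))[:5]
-- ===== Notes on version B (the rewrite author's own statement) =====
-- stated objective: simpler
-- what changed: Replaces A's incremental membership-check-and-break accumulator loop with a collect-all-candidates / ordered-dedup (dict.fromkeys) / slice-first-5 pipeline.
import Mathlib
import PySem

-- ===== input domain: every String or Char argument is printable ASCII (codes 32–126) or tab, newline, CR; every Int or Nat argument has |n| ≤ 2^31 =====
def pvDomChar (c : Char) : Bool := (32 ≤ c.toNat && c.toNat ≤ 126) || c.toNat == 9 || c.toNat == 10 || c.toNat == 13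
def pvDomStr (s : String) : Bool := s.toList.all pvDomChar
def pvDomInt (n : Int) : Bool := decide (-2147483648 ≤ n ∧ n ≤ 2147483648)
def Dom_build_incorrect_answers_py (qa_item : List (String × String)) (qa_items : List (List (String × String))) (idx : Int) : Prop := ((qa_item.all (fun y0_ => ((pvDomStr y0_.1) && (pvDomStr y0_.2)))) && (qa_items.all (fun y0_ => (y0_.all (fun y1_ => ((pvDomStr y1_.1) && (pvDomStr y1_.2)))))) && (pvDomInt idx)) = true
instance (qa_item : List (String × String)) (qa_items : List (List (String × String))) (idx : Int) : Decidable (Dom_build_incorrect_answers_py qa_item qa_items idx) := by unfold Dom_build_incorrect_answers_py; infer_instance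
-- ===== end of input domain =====

-- ===== PORT A =====
-- B collects all candidates first, dedups with dict.fromkeys and slices, instead of A's
-- incremental membership-check-and-break loop; objective: simpler (same values proved equal).

-- shared helpers: dict.get(key) as first-match lookup, and _safe_text (strip, None -> "")
def pvGet (d : List (String × String)) (k : String) : Option String :=
  match d with
  | [] => none
  | (a, b) :: rest => if a = k then some b else pvGet rest k

def pvSafeText (v : Option String) : String :=
  match v with
  | none => ""
  | some s => PySem.Str.strip s

-- A's loop over enumerate(qa_items): append when nonempty and new, break at 5
def pvLoopA (idx : Int) (items : List (Int × List (String × String))) (negs : List String) : List String :=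
  match items with
  | [] => negs
  | (j, other) :: rest =>
    if j = idx then pvLoopA idx rest negs
    else
      let ans := pvSafeText (pvGet other "answer")
      let negs' := if ans ≠ "" ∧ ans ∉ negs then negs ++ [ans] else negs
      if 5 ≤ negs'.length then negs' else pvLoopA idx rest negs'

def build_incorrect_answers_py (qa_item : List (String × String)) (qa_items : List (List (String × String))) (idx : Int) : List String :=
  let adv := pvSafeText (pvGet qa_item "adversarial_answer")
  let negatives : List String := if adv ≠ "" then [adv] else []
  pvLoopA idx (PySem.List.enumerate qa_items) negatives

-- ===== PORT B =====
-- the comprehension: one candidate per item, skipping index idx and empty answers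
def pvCand? (idx : Int) (p : Int × List (String × String)) : Option String :=
  if p.1 ≠ idx then
    let ans := pvSafeText (pvGet p.2 "answer")
    if ans ≠ "" then some ans else none
  else none

def build_incorrect_answers_py_alt (qa_item : List (String × String)) (qa_items : List (List (String × String))) (idx : Int) : List String :=
  let adv := pvSafeText (pvGet qa_item "adversarial_answer")
  let candidates : List String :=
    (if adv ≠ "" then [adv] else []) ++ (PySem.List.enumerate qa_items).filterMap (pvCand? idx)
  (PySem.List.dedup candidates).take 5

-- ===== PRECONDITION & SPEC =====
def Spec_build_incorrect_answers_py (qa_item : List (String × String)) (qa_items : List (List (String × String))) (idx : Int) (out : List String) : Prop := out = build_incorrect_answers_py_alt qa_item qa_items idx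
instance (qa_item : List (String × String)) (qa_items : List (List (String × String))) (idx : Int) (out : List String) : Decidable (Spec_build_incorrect_answers_py qa_item qa_items idx out) := by unfold Spec_build_incorrect_answers_py; infer_instance

-- ===== CLAIM (what is proved, stated in full; the proofs are below) =====
def Claim_equal_build_incorrect_answers_py : Prop := ∀ (qa_item : List (String × String)) (qa_items : List (List (String × String))) (idx : Int), Dom_build_incorrect_answers_py qa_item qa_items idx → Spec_build_incorrect_answers_py qa_item qa_items idx (build_incorrect_answers_py qa_item qa_items idx)

-- ===== LEMMAS AND PROOFS =====

-- ordered first-occurrence dedup, with an explicit "already seen" accumulator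
def pvDedupSeen : List String → List String → List String
  | [], _ => []
  | x :: xs, seen => if x ∈ seen then pvDedupSeen xs seen else x :: pvDedupSeen xs (x :: seen)

theorem pvDedupSeen_congr (xs : List String) (s t : List String) (h : ∀ a, a ∈ s ↔ a ∈ t) :
    pvDedupSeen xs s = pvDedupSeen xs t := by
  induction xs generalizing s t with
  | nil => rfl
  | cons x xs ih =>
    simp only [pvDedupSeen]
    by_cases hx : x ∈ s
    · rw [if_pos hx, if_pos ((h x).mp hx)]
      exact ih s t h
    · rw [if_neg hx, if_neg (fun c => hx ((h x).mpr c))]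
      refine congrArg _ (ih _ _ ?_)
      intro a; simp [h a]

theorem pvFoldlAdd_eq (xs acc : List String) :
    List.foldl PySem.Set.add acc xs = acc ++ pvDedupSeen xs acc := by
  induction xs generalizing acc with
  | nil => simp [pvDedupSeen]
  | cons x xs ih =>
    simp only [List.foldl_cons, pvDedupSeen, PySem.Set.add, PySem.Set.contains]
    by_cases hx : x ∈ acc
    · simp [hx, ih]
    · have hc : acc.contains x = false := by simpa using hx
      simp only [hc, Bool.false_eq_true, if_false, ih (acc ++ [x])]
      rw [pvDedupSeen_congr xs (acc ++ [x]) (x :: acc) (by intro a; simp [or_comm])]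
      simp [hx]

theorem pvDedup_eq (xs : List String) : PySem.List.dedup xs = pvDedupSeen xs [] := by
  rw [PySem.List.dedup_eq_ofList]
  show List.foldl PySem.Set.add [] xs = _
  rw [pvFoldlAdd_eq]
  rfl

theorem pvLoopA_eq (idx : Int) (rest : List (Int × List (String × String))) :
    ∀ negs : List String, negs.length < 5 →
      pvLoopA idx rest negs
        = negs ++ (pvDedupSeen (rest.filterMap (pvCand? idx)) negs).take (5 - negs.length) := by
  induction rest with
  | nil => intro negs _; simp [pvLoopA, pvDedupSeen]
  | cons p rest ih =>
    intro negs h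
    obtain ⟨j, other⟩ := p
    set ans := pvSafeText (pvGet other "answer") with hans
    have h5n : ¬ (5 ≤ negs.length) := by omega
    by_cases hj : j = idx
    · have hfm : List.filterMap (pvCand? idx) ((j, other) :: rest)
          = List.filterMap (pvCand? idx) rest := by
        simp [pvCand?, hj]
      rw [hfm]
      simp only [pvLoopA, if_pos hj]
      exact ih negs h
    · by_cases ha : ans = ""
      · have hfm : List.filterMap (pvCand? idx) ((j, other) :: rest)
            = List.filterMap (pvCand? idx) rest := by
          simp [pvCand?, hj, ← hans, ha]
        rw [hfm]
        simp only [pvLoopA, if_neg hj, ← hans, ha, ne_eq, not_true_eq_false, false_and, if_false,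
          h5n]
        exact ih negs h
      · have hfm : List.filterMap (pvCand? idx) ((j, other) :: rest)
            = ans :: List.filterMap (pvCand? idx) rest := by
          simp [pvCand?, hj, ← hans, ha]
        rw [hfm]
        by_cases hm : ans ∈ negs
        · simp only [pvLoopA, if_neg hj, ← hans, ne_eq, ha, not_false_eq_true, true_and, hm,
            not_true_eq_false, if_false, h5n, pvDedupSeen, if_pos]
          exact ih negs h
        · simp only [pvLoopA, if_neg hj, ← hans, ne_eq, ha, not_false_eq_true, true_and, hm,
            if_true, pvDedupSeen, if_false, List.length_append, List.length_cons, List.length_nil]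
          have htake : (5 - negs.length) = (5 - (negs.length + 1)) + 1 := by omega
          by_cases h5 : 5 ≤ negs.length + 1
          · have hn4 : negs.length = 4 := by omega
            rw [if_pos (by simpa using h5)]
            simp [hn4]
          · rw [if_neg (by simpa using h5)]
            rw [ih (negs ++ [ans]) (by simp; omega)]
            rw [pvDedupSeen_congr _ (negs ++ [ans]) (ans :: negs) (by intro a; simp [or_comm])]
            simp [htake]

-- ===== VERDICT (by name: the statement is the Claim_ definition above) =====
theorem build_incorrect_answers_py_spec : Claim_equal_build_incorrect_answers_py := by
  intro qa_item qa_items idx _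
  unfold Spec_build_incorrect_answers_py
  unfold build_incorrect_answers_py build_incorrect_answers_py_alt
  dsimp only
  rw [pvDedup_eq]
  by_cases hadv : pvSafeText (pvGet qa_item "adversarial_answer") ≠ ""
  · simp only [if_pos hadv]
    rw [pvLoopA_eq idx _ [_] (by simp)]
    simp only [List.cons_append, List.nil_append, pvDedupSeen, List.not_mem_nil, if_false,
      List.take_succ_cons, List.length_cons, List.length_nil]
  · simp only [if_neg hadv]
    rw [pvLoopA_eq idx _ [] (by simp), List.nil_append, List.nil_append]
    rfl
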